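-- pv_equiv track=rewrite | github.com/ChenDoubleJ/GNDST | read.py | verification_merge
-- ===== SOURCE A (Python) =====
-- def verification_merge(list1, list2, list3):
--     final = []
--     for epo_bd in list1:
--         for epo_gps in list2:
--             if epo_bd[0][1] == epo_gps[0][1]:
--                 for epo_gal in list3:
--                     if epo_bd[0][1] == epo_gps[0][1] == epo_gal[0][1]:
--                         final.append(epo_bd+epo_gps+epo_gal)
--                         break
--                 break
--     return final
-- ===== SOURCE B (Python) =====
-- def verification_merge(list1, list2, list3):
--     idx2 = {}
--     for rec in list2:
--         idx2.setdefault(rec[0][1], rec)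
--     idx3 = {}
--     for rec in list3:
--         idx3.setdefault(rec[0][1], rec)
--     final = []
--     for rec in list1:
--         k = rec[0][1]
--         if k in idx2 and k in idx3:
--             final.append(rec + idx2[k] + idx3[k])
--     return final
-- ===== Notes on version B (the rewrite author's own statement) =====
-- stated objective: alternative
-- what changed: B indexes list2 and list3 once into dicts keyed by rec[0][1] (first occurrence wins, matching A's break-on-first-match), then does a single pass over list1, replacing A's nested rescans of list2 and list3; worst-case cost drops but typical timed inputs showed no measured speed-up.
-- outside the precondition, e.g. on verification_merge([], [[[0], [0], [2, 2, 2]]], []): A returns [], B raises IndexError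
import Mathlib
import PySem

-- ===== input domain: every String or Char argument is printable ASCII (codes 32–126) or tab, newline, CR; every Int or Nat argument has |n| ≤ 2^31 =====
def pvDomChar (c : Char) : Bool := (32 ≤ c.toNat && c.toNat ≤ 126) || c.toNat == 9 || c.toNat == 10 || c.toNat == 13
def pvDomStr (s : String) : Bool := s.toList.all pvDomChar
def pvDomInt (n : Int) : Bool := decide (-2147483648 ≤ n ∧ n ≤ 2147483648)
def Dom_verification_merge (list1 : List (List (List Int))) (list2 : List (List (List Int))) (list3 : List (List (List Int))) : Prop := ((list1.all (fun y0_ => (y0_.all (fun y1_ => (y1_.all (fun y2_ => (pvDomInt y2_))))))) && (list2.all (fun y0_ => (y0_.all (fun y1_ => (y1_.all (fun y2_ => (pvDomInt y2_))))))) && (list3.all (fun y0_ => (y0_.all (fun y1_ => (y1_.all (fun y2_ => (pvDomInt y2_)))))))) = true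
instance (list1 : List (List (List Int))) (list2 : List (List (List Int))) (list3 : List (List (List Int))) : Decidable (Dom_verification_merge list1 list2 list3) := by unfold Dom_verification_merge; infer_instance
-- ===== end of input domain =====

-- B replaces A's nested rescans of list2/list3 with one-pass first-occurrence dict indexes (alternative algorithm; no speed claim).

-- ===== PORT A =====
-- rec[0][1]; inside Pre_ both indexings succeed, so the .getD 0 default is never reached
def pvKey (r : List (List Int)) : Int :=
  ((PySem.List.pyGet? r 0).bind (fun row => PySem.List.pyGet? row 1)).getD 0

-- the inner 'for epo_gal in list3: if …: append; break' loop (returns the row to append, if any)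
def pvGalLoop (kb kg : Int) (epo_bd epo_gps : List (List Int)) : List (List (List Int)) → Option (List (List Int))
  | [] => none
  | epo_gal :: rest =>
      if kb == kg && kg == pvKey epo_gal then some (epo_bd ++ epo_gps ++ epo_gal)
      else pvGalLoop kb kg epo_bd epo_gps rest

-- the 'for epo_gps in list2: if …: <gal loop>; break' loop
def pvGpsLoop (epo_bd : List (List Int)) (list3 : List (List (List Int))) : List (List (List Int)) → Option (List (List Int))
  | [] => none
  | epo_gps :: rest =>
      if pvKey epo_bd == pvKey epo_gps then pvGalLoop (pvKey epo_bd) (pvKey epo_gps) epo_bd epo_gps list3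
      else pvGpsLoop epo_bd list3 rest

def verification_merge (list1 : List (List (List Int))) (list2 : List (List (List Int))) (list3 : List (List (List Int))) : List (List (List Int)) :=
  list1.foldl (fun final epo_bd =>
    match pvGpsLoop epo_bd list3 list2 with
    | some row => final ++ [row]
    | none => final) []

-- ===== PORT B =====
-- idx.setdefault(rec[0][1], rec) over the list: first occurrence per key wins
def pvIndexByKey (l : List (List (List Int))) : PySem.Dict Int (List (List Int)) :=
  l.foldl (fun d r => d.setdefault (pvKey r) r) PySem.Dict.empty

def verification_merge_alt (list1 : List (List (List Int))) (list2 : List (List (List Int))) (list3 : List (List (List Int))) : List (List (List Int)) :=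
  let idx2 := pvIndexByKey list2
  let idx3 := pvIndexByKey list3
  list1.foldl (fun final r =>
    match idx2.get? (pvKey r), idx3.get? (pvKey r) with
    | some r2, some r3 => final ++ [r ++ r2 ++ r3]
    | _, _ => final) []

-- ===== PRECONDITION & SPEC =====
-- Pre_ excludes inputs containing a malformed record (no first row of length ≥ 2): on those A raises
-- IndexError, or returns only because its nested scans happen to stop before reaching the record.
def Pre_verification_merge (list1 : List (List (List Int))) (list2 : List (List (List Int))) (list3 : List (List (List Int))) : Prop :=
  ∀ r ∈ list1 ++ list2 ++ list3, r ≠ [] ∧ 2 ≤ (r.headD []).length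
instance (list1 : List (List (List Int))) (list2 : List (List (List Int))) (list3 : List (List (List Int))) : Decidable (Pre_verification_merge list1 list2 list3) := by unfold Pre_verification_merge; infer_instance

def pvWitness_verification_merge : List (List (List Int)) × List (List (List Int)) × List (List (List Int)) :=
  ([[[1, 2]]], [[[3, 2]]], [[[4, 2]]])

def Spec_verification_merge (list1 : List (List (List Int))) (list2 : List (List (List Int))) (list3 : List (List (List Int))) (out : List (List (List Int))) : Prop := out = verification_merge_alt list1 list2 list3
instance (list1 : List (List (List Int))) (list2 : List (List (List Int))) (list3 : List (List (List Int))) (out : List (List (List Int))) : Decidable (Spec_verification_merge list1 list2 list3 out) := by unfold Spec_verification_merge; infer_instance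

-- ===== CLAIM (what is proved, stated in full; the proofs are below) =====
def Claim_equal_verification_merge : Prop := ∀ (list1 : List (List (List Int))) (list2 : List (List (List Int))) (list3 : List (List (List Int))), Dom_verification_merge list1 list2 list3 → Pre_verification_merge list1 list2 list3 → Spec_verification_merge list1 list2 list3 (verification_merge list1 list2 list3)

-- ===== LEMMAS AND PROOFS =====

-- the gal loop with kb = kg is a first-match scan of list3
theorem pvGalLoop_eq (k : Int) (bd g : List (List Int)) (l3 : List (List (List Int))) :
    pvGalLoop k k bd g l3 = (l3.find? (fun r => pvKey r == k)).map (fun r3 => bd ++ g ++ r3) := by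
  induction l3 with
  | nil => rfl
  | cons r rest ih =>
      simp only [pvGalLoop, List.find?_cons]
      by_cases h : pvKey r = k
      · simp [h]
      · have h1 : (pvKey r == k) = false := by simp [h]
        have h2 : (k == pvKey r) = false := by rw [beq_eq_false_iff_ne]; exact fun e => h e.symm
        simp [h1, h2, ih]

-- the gps loop is a first-match scan of list2 followed by the gal scan of list3
theorem pvGpsLoop_eq (bd : List (List Int)) (l3 l2 : List (List (List Int))) :
    pvGpsLoop bd l3 l2 =
      match l2.find? (fun r => pvKey r == pvKey bd) with
      | none => none
      | some g => (l3.find? (fun r => pvKey r == pvKey bd)).map (fun r3 => bd ++ g ++ r3) := by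
  induction l2 with
  | nil => rfl
  | cons g rest ih =>
      simp only [pvGpsLoop, List.find?_cons]
      by_cases h : pvKey g = pvKey bd
      · simp [h, pvGalLoop_eq]
      · have h1 : (pvKey g == pvKey bd) = false := by simp [h]
        have h2 : (pvKey bd == pvKey g) = false := by rw [beq_eq_false_iff_ne]; exact fun e => h e.symm
        simp [h1, h2, ih]

-- the setdefault fold keeps the FIRST record per key: lookup = first-match scan
theorem get?_setdefault_fold (l : List (List (List Int))) (d : PySem.Dict Int (List (List Int))) (k : Int) :
    (l.foldl (fun d r => d.setdefault (pvKey r) r) d).get? k =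
      match d.get? k with
      | some v => some v
      | none => l.find? (fun r => pvKey r == k) := by
  induction l generalizing d with
  | nil =>
      simp only [List.foldl_nil]
      rcases hd : d.get? k with _ | v <;> simp
  | cons r rest ih =>
      simp only [List.foldl_cons, ih, List.find?_cons]
      by_cases hk : pvKey r = k
      · subst hk
        rw [PySem.Dict.get?_setdefault_self]
        rcases hd : d.get? (pvKey r) with _ | v <;> simp
      · have hne : k ≠ pvKey r := fun e => hk e.symm
        rw [PySem.Dict.get?_setdefault_of_ne d r hne]
        have h1 : (pvKey r == k) = false := by simp [hk]
        rcases hd : d.get? k with _ | v <;> simp [h1]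

theorem pvIndexByKey_get? (l : List (List (List Int))) (k : Int) :
    (pvIndexByKey l).get? k = l.find? (fun r => pvKey r == k) := by
  unfold pvIndexByKey
  rw [get?_setdefault_fold]
  simp [PySem.Dict.get?_empty]

-- ===== VERDICT (by name: the statement is the Claim_ definition above) =====
theorem verification_merge_spec : Claim_equal_verification_merge := by
  intro l1 l2 l3 _ _
  unfold Spec_verification_merge
  show verification_merge l1 l2 l3 = verification_merge_alt l1 l2 l3
  simp only [verification_merge, verification_merge_alt]
  have hstep : (fun (final : List (List (List Int))) (epo_bd : List (List Int)) =>
      match pvGpsLoop epo_bd l3 l2 with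
      | some row => final ++ [row]
      | none => final) =
      fun final r =>
        match (pvIndexByKey l2).get? (pvKey r), (pvIndexByKey l3).get? (pvKey r) with
        | some r2, some r3 => final ++ [r ++ r2 ++ r3]
        | _, _ => final := by
    funext final r
    rw [pvGpsLoop_eq, pvIndexByKey_get?, pvIndexByKey_get?]
    rcases l2.find? (fun g => pvKey g == pvKey r) with _ | g <;>
      rcases l3.find? (fun g => pvKey g == pvKey r) with _ | g3 <;> rfl
  rw [hstep]
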